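-- pv_equiv track=rewrite | github.com/DeadCoder-N/root | security-toolkit/tool-11-port-scanner/backend/app.py | add_fix_prompts
-- ===== SOURCE A (Python) =====
-- def add_fix_prompts(vulnerabilities):
--     """Add actionable fix prompts to vulnerabilities"""
--     for vuln in vulnerabilities:
--         vuln_type = vuln.get('type', '')
--
--         if 'Risky Port' in vuln_type:
--             vuln['fix_prompt'] = "Close unnecessary ports. Use firewall rules (iptables, ufw). Disable unused services. Port 21 (FTP): use SFTP. Port 23 (Telnet): use SSH. Port 3389 (RDP): use VPN."
--         elif 'Open Port' in vuln_type:
--             vuln['fix_prompt'] = "Review all open ports. Close unused ports. Implement firewall rules. Use principle of least privilege."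
--         elif 'Service' in vuln_type:
--             vuln['fix_prompt'] = "Update service to latest version. Disable if not needed. Configure securely. Use strong authentication."
--         else:
--             vuln['fix_prompt'] = f"Review and fix {vuln_type}. Check OWASP Network Security guidelines."
--
--     return vulnerabilities
-- ===== SOURCE B (Python) =====
-- # Staged-overwrite re-implementation: one pass gives every vuln the default prompt,
-- # then one overwrite pass per rule in increasing priority (later passes win), instead
-- # of A's single pass with a first-match elif cascade. Mutates the dicts in place like A.
-- _OVERRIDES = [  # applied lowest priority first; a later pass overwrites an earlier one
--     ('Service', "Update service to latest version. Disable if not needed. Configure securely. Use strong authentication."),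
--     ('Open Port', "Review all open ports. Close unused ports. Implement firewall rules. Use principle of least privilege."),
--     ('Risky Port', "Close unnecessary ports. Use firewall rules (iptables, ufw). Disable unused services. Port 21 (FTP): use SFTP. Port 23 (Telnet): use SSH. Port 3389 (RDP): use VPN."),
-- ]
--
-- def add_fix_prompts(vulnerabilities):
--     """Add actionable fix prompts to vulnerabilities"""
--     # stage 0: everyone gets the generic prompt
--     for vuln in vulnerabilities:
--         vuln['fix_prompt'] = f"Review and fix {vuln.get('type', '')}. Check OWASP Network Security guidelines."
--     # stages 1..3: each rule overwrites the prompt of every vuln it matches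
--     for sub, prompt in _OVERRIDES:
--         for vuln in vulnerabilities:
--             if sub in vuln.get('type', ''):
--                 vuln['fix_prompt'] = prompt
--     return vulnerabilities
-- ===== Notes on version B (the rewrite author's own statement) =====
-- stated objective: alternative
-- what changed: Replaces the single pass with an elif cascade by staged overwrite passes: a default-prompt pass followed by one overwrite pass per rule in increasing priority, so the last matching pass wins instead of the first matching branch.
import Mathlib
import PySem

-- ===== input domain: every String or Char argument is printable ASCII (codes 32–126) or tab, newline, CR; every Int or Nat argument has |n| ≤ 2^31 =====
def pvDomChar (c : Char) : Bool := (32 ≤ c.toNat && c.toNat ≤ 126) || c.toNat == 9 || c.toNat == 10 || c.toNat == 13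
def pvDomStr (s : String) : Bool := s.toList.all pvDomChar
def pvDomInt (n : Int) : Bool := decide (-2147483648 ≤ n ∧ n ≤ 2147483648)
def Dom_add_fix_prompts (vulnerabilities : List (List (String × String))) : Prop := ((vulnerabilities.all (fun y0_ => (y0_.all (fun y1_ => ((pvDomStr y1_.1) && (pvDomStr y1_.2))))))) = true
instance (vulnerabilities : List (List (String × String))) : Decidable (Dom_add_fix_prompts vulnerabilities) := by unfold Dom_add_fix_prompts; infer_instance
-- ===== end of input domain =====

-- B replaces A's single first-match elif pass by staged overwrite passes (default pass,
-- then one pass per rule in increasing priority); same return value, same in-place mutation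
-- of the dicts (proved on the return value).

-- the three fixed prompt strings (shared literals of both programs)
def pRisky : String := "Close unnecessary ports. Use firewall rules (iptables, ufw). Disable unused services. Port 21 (FTP): use SFTP. Port 23 (Telnet): use SSH. Port 3389 (RDP): use VPN."
def pOpen : String := "Review all open ports. Close unused ports. Implement firewall rules. Use principle of least privilege."
def pService : String := "Update service to latest version. Disable if not needed. Configure securely. Use strong authentication."

-- ===== PORT A =====
def add_fix_prompts (vulnerabilities : List (List (String × String))) : List (List (String × String)) :=
  vulnerabilities.map (fun vuln =>
    let d := PySem.Dict.mk vuln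
    let vuln_type := d.getD "type" ""
    if PySem.Str.isIn "Risky Port" vuln_type then
      (d.insert "fix_prompt" pRisky).items
    else if PySem.Str.isIn "Open Port" vuln_type then
      (d.insert "fix_prompt" pOpen).items
    else if PySem.Str.isIn "Service" vuln_type then
      (d.insert "fix_prompt" pService).items
    else
      (d.insert "fix_prompt" ("Review and fix " ++ vuln_type ++ ". Check OWASP Network Security guidelines.")).items)

-- ===== PORT B =====
-- body of one overwrite pass: give `vuln` the prompt if `sub` matches its type
def passFn (sub prompt : String) (vuln : List (String × String)) : List (String × String) :=
  let d := PySem.Dict.mk vuln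
  if PySem.Str.isIn sub (d.getD "type" "") then (d.insert "fix_prompt" prompt).items else vuln

-- stage 0: give `vuln` the generic prompt
def defaultFn (vuln : List (String × String)) : List (String × String) :=
  let d := PySem.Dict.mk vuln
  (d.insert "fix_prompt" ("Review and fix " ++ d.getD "type" "" ++ ". Check OWASP Network Security guidelines.")).items

def overrides : List (String × String) :=
  [("Service", pService), ("Open Port", pOpen), ("Risky Port", pRisky)]

def add_fix_prompts_alt (vulnerabilities : List (List (String × String))) : List (List (String × String)) :=
  let staged := vulnerabilities.map defaultFn
  overrides.foldl (fun vs r => vs.map (passFn r.1 r.2)) staged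

-- ===== PRECONDITION & SPEC =====
def Spec_add_fix_prompts (vulnerabilities : List (List (String × String))) (out : List (List (String × String))) : Prop := out = add_fix_prompts_alt vulnerabilities
instance (vulnerabilities : List (List (String × String))) (out : List (List (String × String))) : Decidable (Spec_add_fix_prompts vulnerabilities out) := by unfold Spec_add_fix_prompts; infer_instance

-- ===== CLAIM (what is proved, stated in full; the proofs are below) =====
def Claim_equal_add_fix_prompts : Prop := ∀ (vulnerabilities : List (List (String × String))), Dom_add_fix_prompts vulnerabilities → Spec_add_fix_prompts vulnerabilities (add_fix_prompts vulnerabilities)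

-- ===== LEMMAS AND PROOFS =====

-- the staged overwrite passes, composed per element, pick exactly the branch of A's elif chain
theorem add_fix_prompts_pointwise (vuln : List (String × String)) :
    (let d := PySem.Dict.mk vuln
     let vuln_type := d.getD "type" ""
     if PySem.Str.isIn "Risky Port" vuln_type then
       (d.insert "fix_prompt" pRisky).items
     else if PySem.Str.isIn "Open Port" vuln_type then
       (d.insert "fix_prompt" pOpen).items
     else if PySem.Str.isIn "Service" vuln_type then
       (d.insert "fix_prompt" pService).items
     else
       (d.insert "fix_prompt" ("Review and fix " ++ vuln_type ++ ". Check OWASP Network Security guidelines.")).items)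
    = passFn "Risky Port" pRisky (passFn "Open Port" pOpen (passFn "Service" pService (defaultFn vuln))) := by
  have hg : ∀ (d : PySem.Dict String String) (v : String),
      (d.insert "fix_prompt" v).getD "type" "" = d.getD "type" "" := by
    intro d v
    rw [PySem.Dict.getD_insert]
    simp
  have eta : ∀ (x : PySem.Dict String String), PySem.Dict.mk x.items = x := fun _ => rfl
  by_cases h1 : PySem.Str.isIn "Risky Port" ((PySem.Dict.mk vuln).getD "type" "") <;>
    by_cases h2 : PySem.Str.isIn "Open Port" ((PySem.Dict.mk vuln).getD "type" "") <;>
      by_cases h3 : PySem.Str.isIn "Service" ((PySem.Dict.mk vuln).getD "type" "") <;>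
        simp at h1 h2 h3 <;>
        simp [passFn, defaultFn, eta, hg, PySem.Dict.insert_insert_self, h1, h2, h3]

-- ===== VERDICT (by name: the statement is the Claim_ definition above) =====
theorem add_fix_prompts_spec : Claim_equal_add_fix_prompts := by
  intro vs _
  unfold Spec_add_fix_prompts add_fix_prompts_alt add_fix_prompts
  rw [overrides, List.foldl_cons, List.foldl_cons, List.foldl_cons, List.foldl_nil,
      List.map_map, List.map_map, List.map_map]
  refine List.map_congr_left ?_
  intro vuln _
  simp only [Function.comp_apply]
  exact add_fix_prompts_pointwise vuln
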